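-- pv_equiv track=rewrite | github.com/lanchiang/AggreCol | aggrdet/helpers.py | is_aggregation_equal
-- ===== SOURCE A (Python) =====
-- hard_empty_cell_values = ['']
--
-- def is_aggregation_equal(groundtruth, prediction, file_values) -> bool:
--     """
--     Check if two aggregations are equal to each other. Two aggregations are equal, if:
--     1) the aggregators are the same
--     2) the aggregatees are the same, or the difference set from prediction to groundtruth (prediction - groundtruth) contains only empty cells.
--
--     :param groundtruth: the groundtruth aggregation, a 2-er tuple of (aggregator_index, aggregatee_indices)
--     :param prediction: the prediction aggregation, a 2-er tuple of (aggregator_index, aggregatee_indices)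
--     :param file_values: values of the file, used to check intersections.
--     :return: true if two aggregations are equal, false otherwise
--     """
--     if groundtruth[0] != prediction[0]:
--         return False
--     if groundtruth[2] != prediction[2]:
--         return False
--
--     groundtruth_aggregatee_indices = sorted(groundtruth[1])
--     prediction_aggregatee_indices = sorted(prediction[1])
--     if groundtruth_aggregatee_indices == prediction_aggregatee_indices:
--         return True
--
--     groundtruth_aggregatee_indices = [tuple(e) for e in groundtruth_aggregatee_indices]
--     prediction_aggregatee_indices = [tuple(e) for e in prediction_aggregatee_indices]
--
--     def diff(l1, l2):
--         return list(set(l1) - set(l2))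
--
--     diff_set = diff(prediction_aggregatee_indices, groundtruth_aggregatee_indices)
--
--     is_equal = True
--     for d in diff_set:
--         if file_values[d[0]][d[1]] not in hard_empty_cell_values:
--             is_equal = False
--             break
--     return is_equal
-- ===== SOURCE B (Python) =====
-- hard_empty_cell_values = ['']
--
--
-- def is_aggregation_equal(groundtruth, prediction, file_values) -> bool:
--     # One early-exit scan over the prediction's aggregatees: each one must either
--     # occur in the groundtruth's aggregatees or point at an empty cell.
--     if groundtruth[0] != prediction[0]:
--         return False
--     if groundtruth[2] != prediction[2]:
--         return False
--     for e in prediction[1]: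
--         if e in groundtruth[1]:
--             continue
--         if file_values[e[0]][e[1]] not in hard_empty_cell_values:
--             return False
--     return True
-- ===== Notes on version B (the rewrite author's own statement) =====
-- stated objective: simpler
-- what changed: B replaces A's sort-both-and-compare precheck plus materialized set difference and break-loop with one early-exit scan over prediction[1] that tests each aggregatee directly for membership in groundtruth[1] or emptiness of its cell; no sorting, no sets and no difference list are built.
-- outside the precondition, e.g. on is_aggregation_equal((0, [], 0), (0, [[9, 9], [0, 0]], 0), [['x']]): A returns False, B raises IndexError
import Mathlib
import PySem

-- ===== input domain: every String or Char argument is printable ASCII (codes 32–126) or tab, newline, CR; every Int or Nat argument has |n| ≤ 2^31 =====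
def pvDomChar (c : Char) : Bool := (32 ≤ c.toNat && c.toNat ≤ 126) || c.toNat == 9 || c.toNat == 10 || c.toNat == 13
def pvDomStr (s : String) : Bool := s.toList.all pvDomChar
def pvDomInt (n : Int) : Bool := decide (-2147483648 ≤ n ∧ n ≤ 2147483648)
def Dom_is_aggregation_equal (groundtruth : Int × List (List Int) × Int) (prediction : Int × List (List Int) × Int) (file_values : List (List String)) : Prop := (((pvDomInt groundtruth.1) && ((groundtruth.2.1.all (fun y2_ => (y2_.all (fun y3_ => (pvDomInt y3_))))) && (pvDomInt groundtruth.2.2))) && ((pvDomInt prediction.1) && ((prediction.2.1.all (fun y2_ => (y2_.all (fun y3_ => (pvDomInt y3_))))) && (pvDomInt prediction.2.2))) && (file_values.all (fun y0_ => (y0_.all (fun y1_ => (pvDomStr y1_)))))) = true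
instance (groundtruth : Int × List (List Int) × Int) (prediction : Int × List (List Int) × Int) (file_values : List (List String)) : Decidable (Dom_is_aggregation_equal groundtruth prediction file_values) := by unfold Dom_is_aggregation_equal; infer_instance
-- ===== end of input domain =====

-- B replaces A's sort-and-compare precheck and materialized set difference + break-loop
-- by a single early-exit scan over prediction[1] testing each aggregatee directly
-- (objective: simpler); equivalence is claimed on Pre_ inputs.

def hard_empty_cell_values : List String := [""]

-- ===== PORT A =====
-- file_values[d[0]][d[1]] as A's subscript chain evaluates it (none = IndexError)
def pyCellA (file_values : List (List String)) (d : List Int) : Option String :=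
  match PySem.List.pyGet? d 0 with
  | none => none
  | some i =>
    match PySem.List.pyGet? file_values i with
    | none => none
    | some row =>
      match PySem.List.pyGet? d 1 with
      | none => none
      | some j => PySem.List.pyGet? row j

-- A's 'for d in diff_set: … break' loop over 'is_equal' (none = IndexError, excluded by Pre_)
def aggLoopA (file_values : List (List String)) : List (List Int) → Bool
  | [] => true
  | d :: rest =>
    match pyCellA file_values d with
    | none => false
    | some v => if !(hard_empty_cell_values.contains v) then false else aggLoopA file_values rest

def is_aggregation_equal (groundtruth : Int × List (List Int) × Int) (prediction : Int × List (List Int) × Int) (file_values : List (List String)) : Bool :=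
  if groundtruth.1 ≠ prediction.1 then false
  else if groundtruth.2.2 ≠ prediction.2.2 then false
  else
    let groundtruth_aggregatee_indices := PySem.List.sorted groundtruth.2.1 (fun x => x) false
    let prediction_aggregatee_indices := PySem.List.sorted prediction.2.1 (fun x => x) false
    if groundtruth_aggregatee_indices = prediction_aggregatee_indices then true
    else
      -- tuple(e) on a list of ints is modelled by the list itself
      let groundtruth_tuples := groundtruth_aggregatee_indices.map (fun e => e)
      let prediction_tuples := prediction_aggregatee_indices.map (fun e => e)
      let diff_set := PySem.Set.diff (PySem.Set.ofList prediction_tuples) (PySem.Set.ofList groundtruth_tuples)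
      aggLoopA file_values diff_set

-- ===== PORT B =====
-- file_values[e[0]][e[1]] in B's loop, as an Option chain (none = IndexError)
def pyCellB (file_values : List (List String)) (d : List Int) : Option String :=
  (PySem.List.pyGet? d 0).bind fun i =>
    (PySem.List.pyGet? file_values i).bind fun row =>
      (PySem.List.pyGet? d 1).bind fun j => PySem.List.pyGet? row j

-- B's 'for e in prediction[1]: …' early-exit scan
def aggLoopB (gt : List (List Int)) (file_values : List (List String)) : List (List Int) → Bool
  | [] => true
  | e :: rest =>
    if gt.contains e then aggLoopB gt file_values rest
    else
      match pyCellB file_values e with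
      | none => false
      | some v =>
        if !(hard_empty_cell_values.contains v) then false
        else aggLoopB gt file_values rest

def is_aggregation_equal_alt (groundtruth : Int × List (List Int) × Int) (prediction : Int × List (List Int) × Int) (file_values : List (List String)) : Bool :=
  if groundtruth.1 ≠ prediction.1 then false
  else if groundtruth.2.2 ≠ prediction.2.2 then false
  else aggLoopB groundtruth.2.1 file_values prediction.2.1

-- ===== PRECONDITION & SPEC =====
-- e is a valid cell reference: length ≥ 2 and both subscripts of file_values succeed
def cellAccessible (file_values : List (List String)) (e : List Int) : Bool :=
  match e with
  | a :: b :: _ =>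
    match PySem.List.pyGet? file_values a with
    | some row => (PySem.List.pyGet? row b).isSome
    | none => false
  | _ => false

-- Pre_ excludes inputs where some predicted aggregatee outside the groundtruth cannot
-- index file_values (too short, or an index out of range): there A raises IndexError or
-- returns False early, depending on CPython's hash-based set iteration order, so its
-- value is accidental (B likewise raises or returns False early there).
def Pre_is_aggregation_equal (groundtruth : Int × List (List Int) × Int) (prediction : Int × List (List Int) × Int) (file_values : List (List String)) : Prop :=
  groundtruth.1 = prediction.1 → groundtruth.2.2 = prediction.2.2 →
    ∀ e ∈ prediction.2.1, e ∈ groundtruth.2.1 ∨ cellAccessible file_values e = true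
instance (groundtruth : Int × List (List Int) × Int) (prediction : Int × List (List Int) × Int) (file_values : List (List String)) : Decidable (Pre_is_aggregation_equal groundtruth prediction file_values) := by unfold Pre_is_aggregation_equal; infer_instance

def pvWitness_is_aggregation_equal : (Int × List (List Int) × Int) × (Int × List (List Int) × Int) × List (List String) :=
  ((0, [[0, 0]], 1), (0, [[0, 0], [0, 1]], 1), [["a", ""]])

def Spec_is_aggregation_equal (groundtruth : Int × List (List Int) × Int) (prediction : Int × List (List Int) × Int) (file_values : List (List String)) (out : Bool) : Prop := out = is_aggregation_equal_alt groundtruth prediction file_values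
instance (groundtruth : Int × List (List Int) × Int) (prediction : Int × List (List Int) × Int) (file_values : List (List String)) (out : Bool) : Decidable (Spec_is_aggregation_equal groundtruth prediction file_values out) := by unfold Spec_is_aggregation_equal; infer_instance

-- ===== CLAIM (what is proved, stated in full; the proofs are below) =====
def Claim_equal_is_aggregation_equal : Prop := ∀ (groundtruth : Int × List (List Int) × Int) (prediction : Int × List (List Int) × Int) (file_values : List (List String)), Dom_is_aggregation_equal groundtruth prediction file_values → Pre_is_aggregation_equal groundtruth prediction file_values → Spec_is_aggregation_equal groundtruth prediction file_values (is_aggregation_equal groundtruth prediction file_values)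

-- ===== LEMMAS AND PROOFS =====

-- the two subscript chains compute the same option
theorem pyCell_eq (file_values : List (List String)) (d : List Int) :
    pyCellA file_values d = pyCellB file_values d := by
  unfold pyCellA pyCellB
  cases h0 : PySem.List.pyGet? d 0 with
  | none => rfl
  | some i =>
    cases hfa : PySem.List.pyGet? file_values i with
    | none => simp [hfa]
    | some row =>
      cases h1 : PySem.List.pyGet? d 1 with
      | none => simp [hfa]
      | some j => simp [hfa]

-- the per-element predicate both loops decide
def cellOk (file_values : List (List String)) (d : List Int) : Bool :=
  match pyCellB file_values d with
  | some v => hard_empty_cell_values.contains v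
  | none => false

-- A's break-loop is an all(...) over its list
theorem aggLoopA_eq_all (file_values : List (List String)) (l : List (List Int)) :
    aggLoopA file_values l = l.all (cellOk file_values) := by
  induction l with
  | nil => rfl
  | cons d rest ih =>
    unfold aggLoopA
    rw [pyCell_eq, List.all_cons, ih]
    cases h : pyCellB file_values d with
    | none => simp [cellOk, h]
    | some v =>
      have hck : cellOk file_values d = hard_empty_cell_values.contains v := by
        simp [cellOk, h]
      rw [hck]
      cases hc : hard_empty_cell_values.contains v
      all_goals simp at hc ⊢
      · intro hv; exact absurd hv hc
      · intro _; exact hc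

-- B's early-exit scan is an all(...) over prediction's aggregatees
theorem aggLoopB_eq_all (gt : List (List Int)) (file_values : List (List String)) (l : List (List Int)) :
    aggLoopB gt file_values l = l.all (fun e => gt.contains e || cellOk file_values e) := by
  induction l with
  | nil => rfl
  | cons e rest ih =>
    unfold aggLoopB
    rw [List.all_cons, ih]
    cases hg : gt.contains e
    · cases h : pyCellB file_values e with
      | none =>
        have hck : cellOk file_values e = false := by simp [cellOk, h]
        rw [hck]
        simp
      | some v =>
        have hck : cellOk file_values e = hard_empty_cell_values.contains v := by
          simp [cellOk, h]
        rw [hck]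
        cases hc : hard_empty_cell_values.contains v
        all_goals simp at hc ⊢
        · intro hv; exact absurd hv hc
        · intro _; exact hc
    · simp

-- the branch after both guards: A's sort-compare + diff-set break-loop equals B's scan
theorem branch_eq (g2 p2 : List (List Int)) (fv : List (List String)) :
    (if PySem.List.sorted g2 (fun x => x) false = PySem.List.sorted p2 (fun x => x) false then true
     else aggLoopA fv (PySem.Set.diff
       (PySem.Set.ofList ((PySem.List.sorted p2 (fun x => x) false).map (fun e => e)))
       (PySem.Set.ofList ((PySem.List.sorted g2 (fun x => x) false).map (fun e => e)))))
    = aggLoopB g2 fv p2 := by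
  have hmemA : ∀ d : List Int,
      d ∈ PySem.Set.diff
        (PySem.Set.ofList ((PySem.List.sorted p2 (fun x => x) false).map (fun e => e)))
        (PySem.Set.ofList ((PySem.List.sorted g2 (fun x => x) false).map (fun e => e))) ↔
        d ∈ p2 ∧ d ∉ g2 := by
    intro d
    rw [PySem.Set.mem_diff]
    simp [PySem.Set.mem_ofList, PySem.List.mem_sorted]
  rw [aggLoopB_eq_all]
  by_cases hs : PySem.List.sorted g2 (fun x => x) false = PySem.List.sorted p2 (fun x => x) false
  · rw [if_pos hs]
    have hps : (PySem.List.sorted g2 (fun x => x) false).Perm p2 := by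
      rw [hs]; exact PySem.List.sorted_perm p2 (fun x => x) false
    have hperm : g2.Perm p2 := (PySem.List.sorted_perm g2 (fun x => x) false).symm.trans hps
    symm
    simp only [List.all_eq_true, Bool.or_eq_true, List.contains_eq_mem, decide_eq_true_eq]
    intro e he
    exact Or.inl (hperm.mem_iff.mpr he)
  · rw [if_neg hs, aggLoopA_eq_all, Bool.eq_iff_iff]
    simp only [List.all_eq_true, Bool.or_eq_true, List.contains_eq_mem, decide_eq_true_eq]
    constructor
    · intro hall e he
      by_cases hg : e ∈ g2
      · exact Or.inl hg
      · exact Or.inr (hall e ((hmemA e).mpr ⟨he, hg⟩))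
    · intro hall d hd
      rcases (hmemA d).mp hd with ⟨hdp, hdg⟩
      rcases hall d hdp with h | h
      · exact absurd h hdg
      · exact h

-- ===== VERDICT (by name: the statement is the Claim_ definition above) =====
theorem is_aggregation_equal_spec : Claim_equal_is_aggregation_equal := by
  unfold Claim_equal_is_aggregation_equal
  intro g p fv _ _
  unfold Spec_is_aggregation_equal is_aggregation_equal is_aggregation_equal_alt
  by_cases h1 : g.1 ≠ p.1
  · rw [if_pos h1, if_pos h1]
  · by_cases h2 : g.2.2 ≠ p.2.2
    · rw [if_neg h1, if_pos h2, if_neg h1, if_pos h2]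
    · rw [if_neg h1, if_neg h2, if_neg h1, if_neg h2]
      exact branch_eq g.2.1 p.2.1 fv
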